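-- pv_equiv track=rewrite | github.com/Faezov/offerQuest | offerquest/ats.py | dedupe_keyword_entries
-- ===== SOURCE A (Python) =====
-- def dedupe_keyword_entries(entries: list[dict]) -> list[dict]:
--     merged: dict[str, dict] = {}
--     for entry in entries:
--         label = entry["label"]
--         if label not in merged:
--             merged[label] = entry
--             continue
--         merged[label]["required"] = merged[label]["required"] or entry["required"]
--         merged[label]["matched"] = merged[label]["matched"] or entry["matched"]
--         merged[label]["priority"] = max(merged[label]["priority"], entry["priority"])
--     return list(merged.values())
-- ===== SOURCE B (Python) =====
-- def dedupe_keyword_entries(entries: list[dict]) -> list[dict]: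
--     # Group entries by label first, then reduce each group onto its first entry
--     # (same in-place mutation of the first dict as the original).
--     groups: dict = {}
--     for entry in entries:
--         groups.setdefault(entry["label"], []).append(entry)
--     result = []
--     for group in groups.values():
--         base = group[0]
--         for e in group[1:]:
--             base["required"] = base["required"] or e["required"]
--             base["matched"] = base["matched"] or e["matched"]
--             base["priority"] = max(base["priority"], e["priority"])
--         result.append(base)
--     return result
-- ===== Notes on version B (the rewrite author's own statement) =====
-- stated objective: alternative
-- what changed: B replaces A's single accumulating pass (merge-on-collision into a label-keyed dict) by a build-index-then-reduce shape: one grouping pass bucketing entries per label, then a reduction of each bucket onto its first entry.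
import Mathlib
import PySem

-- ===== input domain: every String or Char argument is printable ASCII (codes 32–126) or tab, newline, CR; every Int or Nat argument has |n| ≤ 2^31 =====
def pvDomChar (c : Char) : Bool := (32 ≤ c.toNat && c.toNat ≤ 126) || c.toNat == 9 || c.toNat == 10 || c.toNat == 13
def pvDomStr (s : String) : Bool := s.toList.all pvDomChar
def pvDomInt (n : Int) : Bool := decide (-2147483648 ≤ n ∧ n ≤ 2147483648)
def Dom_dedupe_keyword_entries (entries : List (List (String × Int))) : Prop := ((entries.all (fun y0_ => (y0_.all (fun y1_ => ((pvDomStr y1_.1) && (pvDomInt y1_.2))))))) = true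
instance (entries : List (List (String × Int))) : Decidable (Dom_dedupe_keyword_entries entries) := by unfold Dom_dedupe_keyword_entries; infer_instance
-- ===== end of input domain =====

-- B groups entries by label first, then reduces each bucket onto its first entry (alternative
-- decomposition, same cost). A mutates the kept entry dicts in place; the equivalence proved
-- here is about the RETURN value (B performs the same mutation in Python).

-- ===== PORT A =====
-- Python `x or y` on ints: x if x is truthy, else y
def pvOr (a b : Int) : Int := if a = 0 then b else a
-- the three merge assignments shared verbatim by both Pythons
def pvMerge (b e : PySem.Dict String Int) : PySem.Dict String Int :=
  let b1 := b.insert "required" (pvOr (b.getD "required" 0) (e.getD "required" 0))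
  let b2 := b1.insert "matched" (pvOr (b1.getD "matched" 0) (e.getD "matched" 0))
  b2.insert "priority" (max (b2.getD "priority" 0) (e.getD "priority" 0))

def dedupe_keyword_entries (entries : List (List (String × Int))) : List (List (String × Int)) :=
  let merged := entries.foldl (fun (m : PySem.Dict Int (PySem.Dict String Int)) e0 =>
    let e := PySem.Dict.ofList e0
    let label := e.getD "label" 0
    if m.contains label = false then m.insert label e
    else m.insert label (pvMerge (m.getD label PySem.Dict.empty) e)) PySem.Dict.empty
  merged.values.map PySem.Dict.items

-- ===== PORT B =====
-- group[0] reduced over group[1:]; groups are never empty, the [] case is a totality guard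
def pvReduceGroup (grp : List (PySem.Dict String Int)) : PySem.Dict String Int :=
  match grp with
  | [] => PySem.Dict.empty
  | b :: rest => rest.foldl pvMerge b

def dedupe_keyword_entries_alt (entries : List (List (String × Int))) : List (List (String × Int)) :=
  let groups := entries.foldl (fun (g : PySem.Dict Int (List (PySem.Dict String Int))) e0 =>
    let e := PySem.Dict.ofList e0
    g.insert (e.getD "label" 0) (g.getD (e.getD "label" 0) [] ++ [e])) PySem.Dict.empty
  groups.values.map (fun grp => (pvReduceGroup grp).items)

-- ===== PRECONDITION & SPEC =====
-- Pre_ excludes inputs on which Python A raises KeyError (an entry without "label", or a merge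
-- touching an entry without "required"/"matched"/"priority"); it conservatively requires all four
-- keys on every duplicated label, which also excludes some inputs where A returns only because
-- `or` short-circuits past a missing key — on those A and B return the same value.
def Pre_dedupe_keyword_entries (entries : List (List (String × Int))) : Prop :=
  (entries.all (fun e =>
    e.any (fun p => p.1 == "label") &&
    (decide (entries.countP (fun e' =>
        (PySem.Dict.ofList e').getD "label" 0 == (PySem.Dict.ofList e).getD "label" 0) ≤ 1) ||
      (e.any (fun p => p.1 == "required") && e.any (fun p => p.1 == "matched") &&
       e.any (fun p => p.1 == "priority"))))) = true
instance (entries : List (List (String × Int))) : Decidable (Pre_dedupe_keyword_entries entries) := by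
  unfold Pre_dedupe_keyword_entries; infer_instance

def pvWitness_dedupe_keyword_entries : (List (List (String × Int))) :=
  [[("label", 1), ("required", 1), ("matched", 0), ("priority", 2)],
   [("label", 1), ("required", 0), ("matched", 1), ("priority", 5)],
   [("label", 2)]]

def Spec_dedupe_keyword_entries (entries : List (List (String × Int))) (out : List (List (String × Int))) : Prop := out = dedupe_keyword_entries_alt entries
instance (entries : List (List (String × Int))) (out : List (List (String × Int))) : Decidable (Spec_dedupe_keyword_entries entries out) := by unfold Spec_dedupe_keyword_entries; infer_instance

-- ===== CLAIM (what is proved, stated in full; the proofs are below) =====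
def Claim_equal_dedupe_keyword_entries : Prop := ∀ (entries : List (List (String × Int))), Dom_dedupe_keyword_entries entries → Pre_dedupe_keyword_entries entries → Spec_dedupe_keyword_entries entries (dedupe_keyword_entries entries)

-- ===== LEMMAS AND PROOFS =====

-- the value-wise relation between A's merged dict and B's groups dict
def pvF2 (p : Int × List (PySem.Dict String Int)) : Int × PySem.Dict String Int :=
  (p.1, pvReduceGroup p.2)

lemma pv_get?_mk_map (l : List (Int × List (PySem.Dict String Int))) (k : Int) :
    (PySem.Dict.mk (l.map pvF2)).get? k = ((PySem.Dict.mk l).get? k).map pvReduceGroup := by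
  induction l with
  | nil => rfl
  | cons p rest ih =>
    obtain ⟨a, b⟩ := p
    simp only [List.map_cons, pvF2, PySem.Dict.get?_mk_cons]
    split <;> simp [ih]

lemma pv_reduce_append (grp : List (PySem.Dict String Int)) (e : PySem.Dict String Int)
    (h : grp ≠ []) : pvReduceGroup (grp ++ [e]) = pvMerge (pvReduceGroup grp) e := by
  cases grp with
  | nil => exact absurd rfl h
  | cons b t => simp [pvReduceGroup, List.foldl_append]

-- one step of the two loops preserves the relation
lemma pv_step (e0 : List (String × Int)) (m : PySem.Dict Int (PySem.Dict String Int))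
    (g : PySem.Dict Int (List (PySem.Dict String Int)))
    (h1 : m.items = g.items.map pvF2) (h2 : g.keys.Nodup) (h3 : ∀ p ∈ g.items, p.2 ≠ []) :
    let e := PySem.Dict.ofList e0
    let k := e.getD "label" 0
    let m' := if m.contains k = false then m.insert k e
              else m.insert k (pvMerge (m.getD k PySem.Dict.empty) e)
    let g' := g.insert k (g.getD k [] ++ [e])
    m'.items = g'.items.map pvF2 ∧ g'.keys.Nodup ∧ ∀ p ∈ g'.items, p.2 ≠ [] := by
  intro e k m' g'
  have hm : m = PySem.Dict.mk (g.items.map pvF2) := PySem.Dict.ext h1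
  have hget : m.get? k = (g.get? k).map pvReduceGroup := by
    rw [hm]; exact pv_get?_mk_map g.items k
  have hcont : m.contains k = g.contains k := by
    rw [PySem.Dict.contains_eq_isSome_get?, PySem.Dict.contains_eq_isSome_get?, hget]
    cases g.get? k <;> rfl
  refine ⟨?_, ?_, ?_⟩
  · show m'.items = g'.items.map pvF2
    by_cases hc : g.contains k = true
    · -- key already present: both sides overwrite in place
      obtain ⟨grp, hgrp⟩ : ∃ grp, g.get? k = some grp := by
        have := (PySem.Dict.contains_eq_isSome_get? g k) ▸ hc
        cases hg : g.get? k with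
        | none => rw [hg] at this; simp at this
        | some v => exact ⟨v, rfl⟩
      have hne : grp ≠ [] := h3 (k, grp) (PySem.Dict.mem_items_of_get?_eq_some g hgrp)
      have hmc : m.contains k = true := hcont.trans hc
      have hmgetD : m.getD k PySem.Dict.empty = pvReduceGroup grp := by
        rw [PySem.Dict.getD_eq_get?_getD, hget, hgrp]; rfl
      have hggetD : g.getD k [] = grp := by
        rw [PySem.Dict.getD_eq_get?_getD, hgrp]; rfl
      have hm' : m' = m.insert k (pvMerge (pvReduceGroup grp) e) := by
        simp [m', hmc, hmgetD]
      rw [hm', PySem.Dict.items_insert_of_contains m _ hmc,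
          show g'.items = g.items.map (fun p => if (p.1 == k) = true then (k, grp ++ [e]) else p) by
            rw [show g' = g.insert k (grp ++ [e]) by simp only [g', hggetD]]
            exact PySem.Dict.items_insert_of_contains g _ hc,
          h1, List.map_map, List.map_map]
      refine List.map_congr_left (fun p hp => ?_)
      by_cases hpk : (p.1 == k) = true
      · have hpk' : p.1 = k := eq_of_beq hpk
        have : g.get? k = some p.2 := by
          have : (k, p.2) ∈ g.items := by rw [← hpk']; exact hp
          exact PySem.Dict.get?_of_mem_items g this h2
        have hp2 : p.2 = grp := by rw [this] at hgrp; exact (Option.some_inj.mp hgrp).symm ▸ rfl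
        simp [Function.comp, pvF2, hpk, hp2, pv_reduce_append grp e hne]
      · simp [Function.comp, pvF2, hpk]
    · -- fresh key: both sides append
      have hc' : g.contains k = false := by simpa using hc
      have hmc : m.contains k = false := hcont.trans hc'
      have hggetD : g.getD k [] = [] := PySem.Dict.getD_of_not_contains g [] hc'
      have hm' : m' = m.insert k e := by simp [m', hmc]
      have hg' : g' = g.insert k [e] := by simp only [g', hggetD]; rfl
      rw [hm', hg', PySem.Dict.items_insert_of_not_contains m e hmc,
          PySem.Dict.items_insert_of_not_contains g [e] hc', h1, List.map_append]
      rfl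
  · exact PySem.Dict.nodup_keys_insert g k _ h2
  · intro p hp
    by_cases hc : g.contains k = true
    · rw [PySem.Dict.items_insert_of_contains g _ hc] at hp
      obtain ⟨q, hq, hpq⟩ := List.mem_map.mp hp
      by_cases hqk : (q.1 == k) = true
      · rw [hqk] at hpq; simp only [if_true] at hpq
        rw [← hpq]; simp
      · rw [if_neg hqk] at hpq; rw [← hpq]; exact h3 q hq
    · have hc' : g.contains k = false := by simpa using hc
      have hggetD : g.getD k [] = [] := PySem.Dict.getD_of_not_contains g [] hc'
      rw [show g' = g.insert k [e] by simp only [g', hggetD]; rfl,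
          PySem.Dict.items_insert_of_not_contains g [e] hc'] at hp
      rcases List.mem_append.mp hp with h | h
      · exact h3 p h
      · simp only [List.mem_singleton] at h; rw [h]; simp
    
-- the two loops stay related over any entry list
lemma pv_loop (l : List (List (String × Int))) :
    ∀ (m : PySem.Dict Int (PySem.Dict String Int)) (g : PySem.Dict Int (List (PySem.Dict String Int))),
    m.items = g.items.map pvF2 → g.keys.Nodup → (∀ p ∈ g.items, p.2 ≠ []) →
    (l.foldl (fun m e0 =>
        let e := PySem.Dict.ofList e0
        let label := e.getD "label" 0
        if m.contains label = false then m.insert label e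
        else m.insert label (pvMerge (m.getD label PySem.Dict.empty) e)) m).items
      = (l.foldl (fun g e0 =>
          let e := PySem.Dict.ofList e0
          g.insert (e.getD "label" 0) (g.getD (e.getD "label" 0) [] ++ [e])) g).items.map pvF2 := by
  induction l with
  | nil => intro m g h1 _ _; exact h1
  | cons e0 rest ih =>
    intro m g h1 h2 h3
    obtain ⟨h1', h2', h3'⟩ := pv_step e0 m g h1 h2 h3
    simpa using ih _ _ h1' h2' h3'

-- ===== VERDICT (by name: the statement is the Claim_ definition above) =====
theorem dedupe_keyword_entries_spec : Claim_equal_dedupe_keyword_entries := by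
  intro entries _ _
  show dedupe_keyword_entries entries = dedupe_keyword_entries_alt entries
  unfold dedupe_keyword_entries dedupe_keyword_entries_alt
  have h := pv_loop entries PySem.Dict.empty PySem.Dict.empty rfl (by simp) (by intro p hp; simp [PySem.Dict.empty] at hp)
  simp only [PySem.Dict.values, h, List.map_map]
  rfl
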